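-- pv_equiv track=rewrite | github.com/E-xxi/Algorithm | Python3/프로그래머스/2/131127. 할인 행사/할인 행사.py | solution
-- ===== SOURCE A (Python) =====
-- from collections import Counter
--
-- def solution(want, number, discount):
--     answer = 0 #회원가입 가능한 기간.
--     # 금액 -> 10일 동안 회원자격, 매일 한 가지 제품 할인
--     # 원하는 제품 할인 제품과 날짜가 10일 연속 일치 -> 회원가입
--
--     want_items = {w:n for w,n in zip(want, number)}
--     for i in range(len(discount)-9):
--         discount_items = Counter(discount[i:i+10])
--
--         if want_items == discount_items:
--             answer += 1
--
--     return answer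
-- ===== SOURCE B (Python) =====
-- def solution(want, number, discount):
--     n = len(discount)
--     if n < 10:
--         return 0
--     target = dict(zip(want, number))
--     if any(v == 0 for v in target.values()):
--         return 0  # a wanted count of 0 can never equal a Counter count
--     need = len(target)
--     cnt = {}
--     matched = 0  # number of wanted items whose window count equals the wanted count
--     bad = 0      # number of window elements that are not wanted items
--     for x in discount[:10]:
--         if x in target:
--             c = cnt.get(x, 0) + 1
--             cnt[x] = c
--             if c == target[x]:
--                 matched += 1
--             elif c - 1 == target[x]:
--                 matched -= 1
--         else:
--             bad += 1
--     answer = 1 if (matched == need and bad == 0) else 0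
--     for i in range(10, n):
--         out = discount[i - 10]
--         inc = discount[i]
--         if out != inc:
--             if out in target:
--                 c = cnt.get(out, 0) - 1
--                 cnt[out] = c
--                 if c == target[out]:
--                     matched += 1
--                 elif c + 1 == target[out]:
--                     matched -= 1
--             else:
--                 bad -= 1
--             if inc in target:
--                 c = cnt.get(inc, 0) + 1
--                 cnt[inc] = c
--                 if c == target[inc]:
--                     matched += 1
--                 elif c - 1 == target[inc]:
--                     matched -= 1
--             else:
--                 bad += 1
--         if matched == need and bad == 0:
--             answer += 1
--     return answer
-- ===== Notes on version B (the rewrite author's own statement) =====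
-- stated objective: faster
-- what changed: Instead of rebuilding a Counter for every 10-day window and comparing it to the wanted dict, B maintains one sliding window with incremental per-item counts plus 'matched'/'bad' tallies updated in O(1) per step.
import Mathlib
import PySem

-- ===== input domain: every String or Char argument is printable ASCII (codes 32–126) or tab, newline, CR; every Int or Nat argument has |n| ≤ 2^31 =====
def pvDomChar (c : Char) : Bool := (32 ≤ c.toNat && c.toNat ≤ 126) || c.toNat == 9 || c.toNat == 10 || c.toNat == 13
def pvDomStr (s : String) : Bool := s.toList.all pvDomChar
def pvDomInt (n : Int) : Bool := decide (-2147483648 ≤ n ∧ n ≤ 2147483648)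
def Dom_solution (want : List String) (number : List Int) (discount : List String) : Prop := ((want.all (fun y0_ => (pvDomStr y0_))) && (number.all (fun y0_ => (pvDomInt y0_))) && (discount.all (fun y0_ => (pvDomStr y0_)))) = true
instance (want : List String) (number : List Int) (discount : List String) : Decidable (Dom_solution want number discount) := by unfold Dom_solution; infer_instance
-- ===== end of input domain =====

-- B replaces A's per-window Counter rebuild + dict comparison by one sliding window with
-- incremental counts and matched/bad tallies, updated in O(1) per day.

-- shared helper: both Pythons build the wanted dict the same way ({w:n for w,n in zip(...)} / dict(zip(...)))
def mkTarget (want : List String) (number : List Int) : PySem.Dict String Int :=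
  (want.zip number).foldl (fun d p => d.insert p.1 p.2) PySem.Dict.empty

-- ===== PORT A =====
-- Python's 'dict1 == dict2' (order-insensitive mapping equality): same size and every item of
-- d1 looked up in d2 gives the same value; exact because Dict keys are unique.
def pyDictEq (d1 d2 : PySem.Dict String Int) : Bool :=
  d1.size == d2.size && d1.items.all (fun p => d2.get? p.1 == some p.2)

def solution (want : List String) (number : List Int) (discount : List String) : Int :=
  let want_items := mkTarget want number
  (PySem.List.pyRange 0 ((discount.length : Int) - 9)).foldl
    (fun answer i =>
      let discount_items := PySem.Dict.counter (PySem.List.slice discount (some i) (some (i + 10)))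
      if pyDictEq want_items discount_items then answer + 1 else answer)
    0

-- ===== PORT B =====
def bAdd (target : PySem.Dict String Int) (st : PySem.Dict String Int × Int × Int) (x : String) :
    PySem.Dict String Int × Int × Int :=
  let cnt := st.1
  let matched := st.2.1
  let bad := st.2.2
  if target.contains x then
    let c := cnt.getD x 0 + 1
    let cnt' := cnt.insert x c
    if c == target.getD x 0 then (cnt', matched + 1, bad)
    else if c - 1 == target.getD x 0 then (cnt', matched - 1, bad)
    else (cnt', matched, bad)
  else (cnt, matched, bad + 1)
def bRemove (target : PySem.Dict String Int) (st : PySem.Dict String Int × Int × Int) (x : String) :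
    PySem.Dict String Int × Int × Int :=
  let cnt := st.1
  let matched := st.2.1
  let bad := st.2.2
  if target.contains x then
    let c := cnt.getD x 0 - 1
    let cnt' := cnt.insert x c
    if c == target.getD x 0 then (cnt', matched + 1, bad)
    else if c + 1 == target.getD x 0 then (cnt', matched - 1, bad)
    else (cnt', matched, bad)
  else (cnt, matched, bad - 1)
def bStep (target : PySem.Dict String Int) (need : Int) (discount : List String)
    (st : (PySem.Dict String Int × Int × Int) × Int) (i : Int) :
    (PySem.Dict String Int × Int × Int) × Int :=
  let out := PySem.List.pyGetD discount (i - 10) ""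
  let inc := PySem.List.pyGetD discount i ""
  let s := if out ≠ inc then bAdd target (bRemove target st.1 out) inc else st.1
  (s, if s.2.1 == need && s.2.2 == 0 then st.2 + 1 else st.2)
def solution_alt (want : List String) (number : List Int) (discount : List String) : Int :=
  let n : Int := (discount.length : Int)
  if n < 10 then 0
  else
    let target := mkTarget want number
    if target.values.any (fun v => v == 0) then 0
    else
      let need : Int := (target.size : Int)
      let init := (PySem.List.slice discount none (some 10)).foldl (bAdd target) (PySem.Dict.empty, 0, 0)
      let answer0 : Int := if init.2.1 == need && init.2.2 == 0 then 1 else 0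
      ((PySem.List.pyRange 10 n).foldl (bStep target need discount) (init, answer0)).2

-- ===== PRECONDITION & SPEC =====
def Spec_solution (want : List String) (number : List Int) (discount : List String) (out : Int) : Prop := out = solution_alt want number discount
instance (want : List String) (number : List Int) (discount : List String) (out : Int) : Decidable (Spec_solution want number discount out) := by unfold Spec_solution; infer_instance

-- ===== CLAIM (what is proved, stated in full; the proofs are below) =====
def Claim_equal_solution : Prop := ∀ (want : List String) (number : List Int) (discount : List String), Dom_solution want number discount → Spec_solution want number discount (solution want number discount)

-- ===== LEMMAS AND PROOFS =====

-- the 10-day window starting at day j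
def win (d : List String) (j : Nat) : List String := (d.drop j).take 10

-- invariant tying B's running state (counts of wanted items, matched tally, bad tally) to the current window w
def BInv (target : PySem.Dict String Int) (st : PySem.Dict String Int × Int × Int) (w : List String) : Prop :=
  (∀ k ∈ target.keys, st.1.getD k 0 = (w.count k : Int)) ∧
  st.2.1 = (target.keys.countP (fun k => st.1.getD k 0 == target.getD k 0) : Int) ∧
  st.2.2 = (w.countP (fun x => !target.contains x) : Int)
lemma mkTarget_nodup (want : List String) (number : List Int) : (mkTarget want number).keys.Nodup := by
  have := PySem.Dict.nodup_keys_foldl_insert_key (want.zip number) Prod.fst (fun d p => p.2)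
    (PySem.Dict.empty : PySem.Dict String Int) (by simp)
  simpa [mkTarget] using this
lemma countP_int_update {α : Type} [DecidableEq α] (l : List α) (hl : l.Nodup) {a : α} (ha : a ∈ l)
    (p q : α → Bool) (h : ∀ b ∈ l, b ≠ a → p b = q b) :
    (l.countP q : Int) = (l.countP p : Int) + (if q a then 1 else 0) - (if p a then 1 else 0) := by
  induction l with
  | nil => cases ha
  | cons b t ih =>
    rcases List.mem_cons.1 ha with rfl | hat
    · have hpq : ∀ c ∈ t, p c = q c := fun c hc => h c (List.mem_cons_of_mem _ hc) (by rintro rfl; exact (List.nodup_cons.1 hl).1 hc)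
      have : t.countP p = t.countP q := List.countP_congr (fun c hc => by rw [hpq c hc])
      simp [List.countP_cons, this]
      split_ifs <;> omega
    · have hba : b ≠ a := by rintro rfl; exact (List.nodup_cons.1 hl).1 hat
      have := ih (List.nodup_cons.1 hl).2 hat (fun c hc hc' => h c (List.mem_cons_of_mem _ hc) hc')
      have hb : p b = q b := h b (List.mem_cons_self) hba
      simp [List.countP_cons, hb] at this ⊢
      split_ifs at * <;> omega
lemma bAdd_inv (target : PySem.Dict String Int) (hnd : target.keys.Nodup)
    (st : PySem.Dict String Int × Int × Int) (w : List String) (x : String)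
    (h : BInv target st w) : BInv target (bAdd target st x) (w ++ [x]) := by
  obtain ⟨h1, h2, h3⟩ := h
  by_cases hx : target.contains x = true
  · have hxk : x ∈ target.keys := by
      rw [PySem.Dict.contains_eq_decide_mem_keys] at hx; exact of_decide_eq_true hx
    have hcx : st.1.getD x 0 = (w.count x : Int) := h1 x hxk
    -- counts after insert
    have hc1 : ∀ k ∈ target.keys, (st.1.insert x (st.1.getD x 0 + 1)).getD k 0 = ((w ++ [x]).count k : Int) := by
      intro k hk
      rw [PySem.Dict.getD_insert]
      by_cases hkx : k = x
      · subst hkx; simp [hcx, List.count_append]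
      · simp [hkx, h1 k hk, List.count_append, Ne.symm hkx]
    -- matched update
    have hm := countP_int_update target.keys hnd hxk
      (fun k => st.1.getD k 0 == target.getD k 0)
      (fun k => (st.1.insert x (st.1.getD x 0 + 1)).getD k 0 == target.getD k 0)
      (by intro b hb hbx; simp [PySem.Dict.getD_insert, hbx])
    have hqx : ((st.1.insert x (st.1.getD x 0 + 1)).getD x 0) = st.1.getD x 0 + 1 :=
      PySem.Dict.getD_insert_self st.1 x (st.1.getD x 0 + 1) 0
    simp only [hqx] at hm
    -- bad unchanged
    have hb3 : ((w ++ [x]).countP (fun y => !target.contains y) : Int) = (w.countP (fun y => !target.contains y) : Int) := by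
      simp [List.countP_append, hx]
    simp only [bAdd, hx, if_true]
    by_cases e1 : (st.1.getD x 0 + 1 == target.getD x 0) = true
    · have e1' : (st.1.getD x 0 == target.getD x 0) = false := by
        rw [beq_eq_false_iff_ne]; rw [beq_iff_eq] at e1; omega
      simp only [e1, if_true]
      refine ⟨hc1, ?_, by rw [h3, ← hb3]⟩
      simp [e1, e1', h2] at hm ⊢
      omega
    · by_cases e2 : (st.1.getD x 0 + 1 - 1 == target.getD x 0) = true
      · have e2' : (st.1.getD x 0 == target.getD x 0) = true := by
          rw [beq_iff_eq] at e2 ⊢; omega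
        simp only [e1, Bool.false_eq_true, if_false, e2, if_true]
        refine ⟨hc1, ?_, by rw [h3, ← hb3]⟩
        simp [e1, e2', h2] at hm ⊢
        omega
      · have e2' : (st.1.getD x 0 == target.getD x 0) = false := by
          rw [beq_eq_false_iff_ne]; rw [beq_iff_eq] at e2; simp at e2; omega
        simp only [e1, Bool.false_eq_true, if_false, e2]
        refine ⟨hc1, ?_, by rw [h3, ← hb3]⟩
        simp [e1, e2', h2] at hm ⊢
        omega
  · have hx' : target.contains x = false := by simpa using hx
    have hxk : x ∉ target.keys := by
      rw [PySem.Dict.contains_eq_decide_mem_keys] at hx'; simpa using hx'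
    simp only [bAdd, hx', Bool.false_eq_true, if_false]
    refine ⟨?_, h2, ?_⟩
    · intro k hk
      have : k ≠ x := by rintro rfl; exact hxk hk
      simp [h1 k hk, List.count_append, Ne.symm this]
    · simp [List.countP_append, hx', h3]
lemma bRemove_inv (target : PySem.Dict String Int) (hnd : target.keys.Nodup)
    (st : PySem.Dict String Int × Int × Int) (w : List String) (x : String)
    (h : BInv target st (x :: w)) : BInv target (bRemove target st x) w := by
  obtain ⟨h1, h2, h3⟩ := h
  by_cases hx : target.contains x = true
  · have hxk : x ∈ target.keys := by
      rw [PySem.Dict.contains_eq_decide_mem_keys] at hx; exact of_decide_eq_true hx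
    have hcx : st.1.getD x 0 = ((x :: w).count x : Int) := h1 x hxk
    have hc1 : ∀ k ∈ target.keys, (st.1.insert x (st.1.getD x 0 - 1)).getD k 0 = (w.count k : Int) := by
      intro k hk
      rw [PySem.Dict.getD_insert]
      by_cases hkx : k = x
      · subst hkx; simp [hcx]
      · simp [hkx, h1 k hk, Ne.symm hkx]
    have hm := countP_int_update target.keys hnd hxk
      (fun k => st.1.getD k 0 == target.getD k 0)
      (fun k => (st.1.insert x (st.1.getD x 0 - 1)).getD k 0 == target.getD k 0)
      (by intro b hb hbx; simp [PySem.Dict.getD_insert, hbx])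
    have hqx : ((st.1.insert x (st.1.getD x 0 - 1)).getD x 0) = st.1.getD x 0 - 1 :=
      PySem.Dict.getD_insert_self st.1 x (st.1.getD x 0 - 1) 0
    simp only [hqx] at hm
    have hb3 : (((x :: w)).countP (fun y => !target.contains y) : Int) = (w.countP (fun y => !target.contains y) : Int) := by
      simp [hx]
    simp only [bRemove, hx, if_true]
    by_cases e1 : (st.1.getD x 0 - 1 == target.getD x 0) = true
    · have e1' : (st.1.getD x 0 == target.getD x 0) = false := by
        rw [beq_eq_false_iff_ne]; rw [beq_iff_eq] at e1; omega
      simp only [e1, if_true]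
      refine ⟨hc1, ?_, by rw [h3, hb3]⟩
      simp [e1, e1', h2] at hm ⊢
      omega
    · by_cases e2 : (st.1.getD x 0 - 1 + 1 == target.getD x 0) = true
      · have e2' : (st.1.getD x 0 == target.getD x 0) = true := by
          rw [beq_iff_eq] at e2 ⊢; omega
        simp only [e1, Bool.false_eq_true, if_false, e2, if_true]
        refine ⟨hc1, ?_, by rw [h3, hb3]⟩
        simp [e1, e2', h2] at hm ⊢
        omega
      · have e2' : (st.1.getD x 0 == target.getD x 0) = false := by
          rw [beq_eq_false_iff_ne]; rw [beq_iff_eq] at e2; simp at e2; omega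
        simp only [e1, Bool.false_eq_true, if_false, e2]
        refine ⟨hc1, ?_, by rw [h3, hb3]⟩
        simp [e1, e2', h2] at hm ⊢
        omega
  · have hx' : target.contains x = false := by simpa using hx
    have hxk : x ∉ target.keys := by
      rw [PySem.Dict.contains_eq_decide_mem_keys] at hx'; simpa using hx'
    simp only [bRemove, hx', Bool.false_eq_true, if_false]
    refine ⟨?_, h2, ?_⟩
    · intro k hk
      have hkx : k ≠ x := by rintro rfl; exact hxk hk
      have := h1 k hk
      simpa [List.count_cons, Ne.symm hkx] using this
    · show st.2.2 - 1 = _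
      rw [h3]
      simp [hx']
lemma inv_rotate (target : PySem.Dict String Int) (st : PySem.Dict String Int × Int × Int)
    (w : List String) (x : String) (h : BInv target st (x :: w)) : BInv target st (w ++ [x]) := by
  obtain ⟨h1, h2, h3⟩ := h
  refine ⟨?_, h2, ?_⟩
  · intro k hk
    rw [h1 k hk]
    simp [List.count_cons, List.count_append]
  · rw [h3]
    simp [List.countP_cons, List.countP_append]
lemma keys_len_size (d : PySem.Dict String Int) : d.keys.length = d.size := by
  simp [PySem.Dict.keys, PySem.Dict.size]
lemma match_iff (target : PySem.Dict String Int) (hnd : target.keys.Nodup)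
    (hz : ∀ v ∈ target.values, v ≠ 0)
    (st : PySem.Dict String Int × Int × Int) (w : List String) (h : BInv target st w) :
    ((st.2.1 == (target.size : Int)) && (st.2.2 == 0)) = pyDictEq target (PySem.Dict.counter w) := by
  obtain ⟨h1, h2, h3⟩ := h
  have hzk : ∀ k ∈ target.keys, target.getD k 0 ≠ 0 := by
    intro k hk
    exact hz _ (by rw [PySem.Dict.values_eq_map_keys target hnd 0]; exact List.mem_map_of_mem hk)
  rw [Bool.eq_iff_iff]
  simp only [Bool.and_eq_true, beq_iff_eq]
  constructor
  · rintro ⟨hm, hbad⟩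
    -- every window element is a wanted item
    have hws : ∀ x ∈ w, target.contains x = true := by
      intro x hxw
      by_contra hc
      have hcp : w.countP (fun y => !target.contains y) = 0 := by
        rw [h3] at hbad; exact_mod_cast hbad
      rw [List.countP_eq_zero] at hcp
      exact (hcp x hxw) (by simp [Bool.eq_false_iff.2 hc])
    -- the window count of every wanted item equals its wanted count
    have hcnt : ∀ k ∈ target.keys, (w.count k : Int) = target.getD k 0 := by
      have hlen : target.keys.countP (fun k => st.1.getD k 0 == target.getD k 0) = target.keys.length := by
        rw [keys_len_size]
        rw [h2] at hm; exact_mod_cast hm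
      intro k hk
      have := List.countP_eq_length.1 hlen k hk
      simp only [beq_iff_eq] at this
      rw [← h1 k hk]; exact this
    have hmemw : ∀ k ∈ target.keys, k ∈ w := by
      intro k hk
      have : (w.count k : Int) ≠ 0 := by rw [hcnt k hk]; exact hzk k hk
      have : w.count k ≠ 0 := by exact_mod_cast this
      exact List.count_pos_iff.1 (Nat.pos_of_ne_zero this)
    have hsub1 : target.keys ⊆ PySem.Set.ofList w := fun k hk =>
      (PySem.Set.mem_ofList w k).2 (hmemw k hk)
    have hsub2 : PySem.Set.ofList w ⊆ target.keys := by
      intro y hy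
      have hyw := (PySem.Set.mem_ofList w y).1 hy
      have := hws y hyw
      rw [PySem.Dict.contains_eq_decide_mem_keys] at this
      exact of_decide_eq_true this
    have hperm : target.keys.Perm (PySem.Set.ofList w) :=
      (List.Nodup.subperm hnd hsub1).perm_of_length_le
        ((List.Nodup.subperm (PySem.Set.nodup_ofList w) hsub2).length_le)
    simp only [pyDictEq, Bool.and_eq_true, beq_iff_eq, List.all_eq_true]
    constructor
    · rw [← keys_len_size, ← keys_len_size, PySem.Dict.keys_counter]
      exact hperm.length_eq
    · intro p hp
      have hk : p.1 ∈ target.keys := PySem.Dict.mem_keys_of_mem_items target hp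
      have hv : target.getD p.1 0 = p.2 := by
        obtain ⟨k, v⟩ := p; exact PySem.Dict.getD_of_mem_items target hp hnd 0
      have hcount : ((w.count p.1 : Nat) : Int) = p.2 := by rw [hcnt p.1 hk, hv]
      have hmem : (p.1, ((w.count p.1 : Nat) : Int)) ∈ (PySem.Dict.counter w).items := by
        rw [PySem.Dict.items_counter]
        exact List.mem_map_of_mem (hsub1 hk)
      have := (PySem.Dict.get?_eq_some_iff_mem_items (PySem.Dict.counter w) p.1 _
        (PySem.Dict.nodup_keys_counter w)).2 hmem
      rw [this, hcount]
  · intro hR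
    simp only [pyDictEq, Bool.and_eq_true, beq_iff_eq, List.all_eq_true] at hR
    obtain ⟨hsz, hitems⟩ := hR
    have hkey_get : ∀ k ∈ target.keys, (PySem.Dict.counter w).get? k = some (target.getD k 0) := by
      intro k hk
      have : (k, target.getD k 0) ∈ target.items := by
        rw [PySem.Dict.items_eq_map_keys target hnd 0]
        exact List.mem_map_of_mem hk
      have := hitems _ this
      simpa using this
    have hcnt : ∀ k ∈ target.keys, (w.count k : Int) = target.getD k 0 := by
      intro k hk
      have := (PySem.Dict.get?_eq_some_iff_mem_items (PySem.Dict.counter w) k _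
        (PySem.Dict.nodup_keys_counter w)).1 (hkey_get k hk)
      rw [PySem.Dict.items_counter] at this
      obtain ⟨k', _, hk'⟩ := List.mem_map.1 this
      have hfst := congrArg Prod.fst hk'
      have hsnd := congrArg Prod.snd hk'
      simp only [] at hfst hsnd
      subst hfst
      exact hsnd
    have hsub1 : target.keys ⊆ PySem.Set.ofList w := by
      intro k hk
      have h0 : (w.count k : Int) ≠ 0 := by rw [hcnt k hk]; exact hzk k hk
      have : w.count k ≠ 0 := by exact_mod_cast h0
      exact (PySem.Set.mem_ofList w k).2 (List.count_pos_iff.1 (Nat.pos_of_ne_zero this))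
    have hlen : (PySem.Set.ofList w).length ≤ target.keys.length := by
      rw [keys_len_size, hsz, ← keys_len_size, PySem.Dict.keys_counter]
    have hperm : target.keys.Perm (PySem.Set.ofList w) :=
      (List.Nodup.subperm hnd hsub1).perm_of_length_le hlen
    have hws : ∀ x ∈ w, target.contains x = true := by
      intro x hxw
      have : x ∈ target.keys := hperm.mem_iff.2 ((PySem.Set.mem_ofList w x).2 hxw)
      rw [PySem.Dict.contains_eq_decide_mem_keys]
      exact decide_eq_true this
    constructor
    · rw [h2, ← keys_len_size]
      have : target.keys.countP (fun k => st.1.getD k 0 == target.getD k 0) = target.keys.length := by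
        rw [List.countP_eq_length]
        intro k hk
        rw [h1 k hk]
        simp [hcnt k hk]
      rw [this]
    · rw [h3]
      have : w.countP (fun x => !target.contains x) = 0 := by
        rw [List.countP_eq_zero]
        intro x hxw
        simp [hws x hxw]
      simp [this]
-- window shape lemmas
lemma win_cons (d : List String) (j : Nat) (h : j < d.length) :
    win d j = d[j] :: (d.drop (j+1)).take 9 := by
  rw [win, List.drop_eq_getElem_cons h]
  rfl

lemma win_snoc (d : List String) (j : Nat) (h : j + 10 < d.length) :
    win d (j+1) = (d.drop (j+1)).take 9 ++ [d[j+10]] := by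
  have h9 : 9 < (d.drop (j+1)).length := by simp; omega
  have hsplit : (d.drop (j+1)).take 10 = (d.drop (j+1)).take 9 ++ [(d.drop (j+1))[9]] := by
    rw [show (10 : Nat) = 9 + 1 from rfl, List.take_add_one, List.getElem?_eq_getElem h9]
    rfl
  have h10 : (d.drop (j+1))[9] = d[j+10] := by
    rw [List.getElem_drop]
  rw [win, hsplit, h10]
-- B's bootstrap loop establishes the invariant
lemma bInit_inv (target : PySem.Dict String Int) (hnd : target.keys.Nodup)
    (hz : ∀ v ∈ target.values, v ≠ 0) (w : List String) :
    BInv target (w.foldl (bAdd target) (PySem.Dict.empty, 0, 0)) w := by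
  induction w using List.reverseRecOn with
  | nil =>
    simp only [List.foldl_nil]
    refine ⟨by simp [PySem.Dict.getD_empty], ?_, by simp⟩
    have hc : target.keys.countP (fun k => ((PySem.Dict.empty : PySem.Dict String Int), (0 : Int), (0 : Int)).1.getD k 0 == target.getD k 0) = 0 := by
      rw [List.countP_eq_zero]
      intro k hk
      have hne : target.getD k 0 ≠ 0 :=
        hz _ (by rw [PySem.Dict.values_eq_map_keys target hnd 0]; exact List.mem_map_of_mem hk)
      simp [PySem.Dict.getD_empty, Ne.symm hne]
    rw [hc]
    simp
  | append_singleton w x ih =>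
    rw [List.foldl_append]
    exact bAdd_inv target hnd _ w x ih
lemma pyRange_shift (a m : Nat) :
    PySem.List.pyRange (a : Int) ((a + m : Nat) : Int) =
      (List.range m).map (fun t => ((a + t : Nat) : Int)) := by
  induction m with
  | zero => simp [PySem.List.pyRange]
  | succ m ih =>
    have : ((a + (m+1) : Nat) : Int) = ((a + m : Nat) : Int) + 1 := by push_cast; ring
    rw [this, PySem.List.pyRange_one_succ_right (by push_cast; omega), ih, List.range_succ]
    simp
lemma slide_loop (target : PySem.Dict String Int) (hnd : target.keys.Nodup)
    (hz : ∀ v ∈ target.values, v ≠ 0) (d : List String) (m : Nat) :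
    ∀ (j : Nat) (st : PySem.Dict String Int × Int × Int) (ans : Int),
    j + 10 + m = d.length →
    BInv target st (win d j) →
    (((List.range m).map (fun t => ((j + 10 + t : Nat) : Int))).foldl
        (bStep target (target.size : Int) d) (st, ans)).2
      = ans + ((List.range m).countP
          (fun t => pyDictEq target (PySem.Dict.counter (win d (j + 1 + t)))) : Int) := by
  induction m with
  | zero => intro j st ans _ _; simp
  | succ m ih =>
    intro j st ans hlen hinv
    have hj10 : j + 10 < d.length := by omega
    have hj : j < d.length := by omega
    -- peel the first step (incoming index j+10)
    rw [List.range_succ_eq_map, List.map_cons, List.foldl_cons]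
    -- evaluate out/inc
    have hout : PySem.List.pyGetD d (((j + 10 + 0 : Nat) : Int) - 10) "" = d[j] := by
      have : (((j + 10 + 0 : Nat) : Int) - 10) = ((j : Nat) : Int) := by push_cast; ring
      rw [this, PySem.List.pyGetD_natCast, List.getD_eq_getElem d "" hj]
    have hinc : PySem.List.pyGetD d ((j + 10 + 0 : Nat) : Int) "" = d[j+10] := by
      rw [show ((j + 10 + 0 : Nat) : Int) = ((j + 10 : Nat) : Int) by push_cast; ring,
        PySem.List.pyGetD_natCast, List.getD_eq_getElem d "" hj10]
    set st' : PySem.Dict String Int × Int × Int :=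
      if d[j] ≠ d[j+10] then bAdd target (bRemove target st d[j]) d[j+10] else st with hst'
    have hinv' : BInv target st' (win d (j+1)) := by
      rw [win_snoc d j hj10]
      rw [win_cons d j hj] at hinv
      by_cases he : d[j] = d[j+10]
      · rw [hst']; simp only [he, ne_eq, not_true_eq_false, if_false]
        have := inv_rotate target st _ _ hinv
        rwa [he] at this
      · rw [hst']; simp only [ne_eq, he, not_false_eq_true, if_true]
        exact bAdd_inv target hnd _ _ _ (bRemove_inv target hnd _ _ _ hinv)
    have hstep : bStep target (target.size : Int) d (st, ans) ((j + 10 + 0 : Nat) : Int)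
        = (st', ans + if pyDictEq target (PySem.Dict.counter (win d (j+1))) then 1 else 0) := by
      rw [bStep]
      simp only [hout, hinc]
      rw [← hst']
      have hcond := match_iff target hnd hz st' (win d (j+1)) hinv'
      rw [← hcond]
      by_cases hb : ((st'.2.1 == (target.size : Int)) && (st'.2.2 == 0)) = true
      · simp [hb]
      · simp only [Bool.not_eq_true] at hb; simp [hb]
    rw [hstep]
    -- align the remaining index list with the IH at j+1
    have hmap : (List.range m).map ((fun t => ((j + 10 + t : Nat) : Int)) ∘ Nat.succ)
        = (List.range m).map (fun t => (((j+1) + 10 + t : Nat) : Int)) := by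
      apply List.map_congr_left
      intro t _
      simp only [Function.comp]
      congr 1
      omega
    have hlen' : (j+1) + 10 + m = d.length := by omega
    rw [List.map_map, hmap,
      ih (j+1) st' (ans + if pyDictEq target (PySem.Dict.counter (win d (j+1))) then 1 else 0)
        hlen' hinv']
    -- count bookkeeping
    rw [List.countP_cons, List.countP_map]
    have hshift : (List.range m).countP
          ((fun t => pyDictEq target (PySem.Dict.counter (win d (j + 1 + t)))) ∘ Nat.succ)
        = (List.range m).countP (fun t => pyDictEq target (PySem.Dict.counter (win d (j + 1 + 1 + t)))) := by
      apply List.countP_congr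
      intro t _
      have ht : j + 1 + Nat.succ t = j + 1 + 1 + t := by omega
      simp only [Function.comp, ht]
    rw [hshift]
    simp only [Nat.add_zero]
    push_cast
    split_ifs <;> ring
lemma pyRange_nil (a b : Int) (h : b ≤ a) : PySem.List.pyRange a b = [] := by
  simp [PySem.List.pyRange]
  omega
-- A's loop counts the windows whose Counter equals the wanted dict
lemma A_count (want : List String) (number : List Int) (discount : List String)
    (h : 9 ≤ discount.length) :
    solution want number discount
      = ((List.range (discount.length - 9)).countP
          (fun j => pyDictEq (mkTarget want number) (PySem.Dict.counter (win discount j))) : Int) := by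
  unfold solution
  simp only []
  have hcast : ((discount.length : Int) - 9) = ((discount.length - 9 : Nat) : Int) := by
    omega
  rw [hcast, PySem.List.pyRange_zero_natCast, List.foldl_map]
  rw [PySem.List.foldl_congr_mem (List.range (discount.length - 9)) _
    (fun (answer : Int) (j : Nat) =>
      if pyDictEq (mkTarget want number) (PySem.Dict.counter (win discount j)) then answer + 1 else answer)
    0
    (by
      intro acc j _
      have h10 : ((j : Int) + 10) = ((j + 10 : Nat) : Int) := by push_cast; ring
      simp only [h10, PySem.List.slice_natCast]
      have h5 : j + 10 - j = 10 := by omega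
      rw [h5]
      rfl)]
  rw [PySem.List.foldl_if_add_one]
  simp
theorem solution_eq (want : List String) (number : List Int) (discount : List String) :
    solution want number discount = solution_alt want number discount := by
  by_cases hlen : discount.length < 10
  · unfold solution_alt
    rw [if_pos (by exact_mod_cast hlen)]
    unfold solution
    rw [pyRange_nil 0 ((discount.length : Int) - 9) (by omega)]
    rfl
  · have hlen' : 10 ≤ discount.length := by omega
    have hA := A_count want number discount (by omega)
    set target := mkTarget want number with htarget
    have hnd : target.keys.Nodup := mkTarget_nodup want number
    unfold solution_alt
    rw [if_neg (by omega)]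
    by_cases hz0 : (target.values.any (fun v => v == 0)) = true
    · rw [← htarget, if_pos hz0, hA]
      have hfalse : ∀ j : Nat, pyDictEq target (PySem.Dict.counter (win discount j)) = false := by
        intro j
        rw [List.any_eq_true] at hz0
        obtain ⟨v, hv, hv0⟩ := hz0
        rw [beq_iff_eq] at hv0; subst hv0
        obtain ⟨p, hp, hp2⟩ := List.mem_map.1 (by
          have : target.values = target.items.map Prod.snd := rfl
          rw [this] at hv; exact hv)
        by_contra hc
        rw [Bool.not_eq_false] at hc
        simp only [pyDictEq, Bool.and_eq_true, beq_iff_eq, List.all_eq_true] at hc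
        obtain ⟨_, hitems⟩ := hc
        have hget := hitems p hp
        rw [hp2] at hget
        have := (PySem.Dict.get?_eq_some_iff_mem_items _ p.1 _
          (PySem.Dict.nodup_keys_counter (win discount j))).1 hget
        rw [PySem.Dict.items_counter] at this
        obtain ⟨k', hk', heq⟩ := List.mem_map.1 this
        have hsnd := congrArg Prod.snd heq
        have hfst := congrArg Prod.fst heq
        simp only [] at hsnd hfst
        have hkw : k' ∈ win discount j := (PySem.Set.mem_ofList _ k').1 hk'
        have : (win discount j).count k' = 0 := by exact_mod_cast hsnd
        exact absurd (List.count_pos_iff.2 hkw) (by omega)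
      have : (List.range (discount.length - 9)).countP
          (fun j => pyDictEq target (PySem.Dict.counter (win discount j))) = 0 := by
        rw [List.countP_eq_zero]
        intro j _
        simp [hfalse j]
      rw [this]
      rfl
    · rw [← htarget, if_neg hz0]
      have hz : ∀ v ∈ target.values, v ≠ 0 := by
        rw [Bool.not_eq_true, List.any_eq_false] at hz0
        intro v hv
        have := hz0 v hv
        simpa using this
      -- the bootstrap window
      have hslice : PySem.List.slice discount none (some 10) = win discount 0 := by
        rw [PySem.List.slice_to discount (by norm_num : (0:Int) ≤ (10:Int)), win, List.drop_zero]
        rfl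
      rw [hslice]
      set init := (win discount 0).foldl (bAdd target) (PySem.Dict.empty, 0, 0) with hinit
      have hinv0 : BInv target init (win discount 0) := bInit_inv target hnd hz _
      have hans0 : (if init.2.1 == (target.size : Int) && init.2.2 == 0 then (1:Int) else 0)
          = (if pyDictEq target (PySem.Dict.counter (win discount 0)) then (1:Int) else 0) := by
        rw [match_iff target hnd hz init _ hinv0]
      have hrange : PySem.List.pyRange 10 (discount.length : Int)
          = (List.range (discount.length - 10)).map (fun t => ((10 + t : Nat) : Int)) := by
        have : ((discount.length : Nat) : Int) = ((10 + (discount.length - 10) : Nat) : Int) := by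
          push_cast; omega
        rw [this, ← pyRange_shift 10 (discount.length - 10)]
        norm_num
      rw [hrange]
      have hmap : (List.range (discount.length - 10)).map (fun t => ((10 + t : Nat) : Int))
          = (List.range (discount.length - 10)).map (fun t => ((0 + 10 + t : Nat) : Int)) := by
        simp
      rw [hmap, slide_loop target hnd hz discount (discount.length - 10) 0 init _ (by omega) hinv0]
      rw [hA, hans0]
      have hsplit : discount.length - 9 = (discount.length - 10) + 1 := by omega
      rw [hsplit, List.range_succ_eq_map, List.countP_cons, List.countP_map]
      have hshift : (List.range (discount.length - 10)).countP
            ((fun j => pyDictEq target (PySem.Dict.counter (win discount j))) ∘ Nat.succ)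
          = (List.range (discount.length - 10)).countP
            (fun t => pyDictEq target (PySem.Dict.counter (win discount (0 + 1 + t)))) := by
        apply List.countP_congr
        intro t _
        have ht : Nat.succ t = 0 + 1 + t := by omega
        simp only [Function.comp, ht]
      rw [hshift]
      push_cast
      split_ifs <;> ring

-- ===== VERDICT (by name: the statement is the Claim_ definition above) =====
theorem solution_spec : Claim_equal_solution := by
  intro want number discount _
  exact solution_eq want number discount
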